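-- pv_equiv track=rewrite | github.com/YuvalRingel/Music-Recognition | a_file_to_segmants.py | find_chunks
-- ===== SOURCE A (Python) =====
-- def find_chunks(peaks, gap, add=0):
--     indexes = []
--     start = peaks[0]
--     finish = peaks[-1]
--     for i in range(len(peaks) - 1):
--         j = i + 1
--         if (peaks[j] - peaks[i]) > gap:  # arbitrary
--             finish = peaks[i]
--             new_index = [start + add, finish + add]
--             start = peaks[j]
--             indexes.append(new_index)
--         if j == (len(peaks) - 1):
--             finish = peaks[j]
--             new_index = [start + add, finish + add]
--             indexes.append(new_index)
--
--     # clean duos with the same values or too small gaps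
--     i = 0
--     while i < len(indexes):
--         duo = indexes[i]
--         if (duo[1] - duo[0] <= gap):
--             indexes.remove(duo)
--         else:
--             i += 1
--     return indexes
-- ===== SOURCE B (Python) =====
-- def find_chunks(peaks, gap, add=0):
--     # group consecutive peaks, breaking where the jump exceeds gap
--     groups = [[peaks[0]]]
--     for prev, cur in zip(peaks, peaks[1:]):
--         if cur - prev > gap:
--             groups.append([cur])
--         else:
--             groups[-1].append(cur)
--     return [[g[0] + add, g[-1] + add] for g in groups if g[-1] - g[0] > gap]
-- ===== Notes on version B (the rewrite author's own statement) =====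
-- stated objective: simpler
-- what changed: B replaces A's index-loop with interleaved double-append plus a destructive remove-while-scanning cleanup by a clean group-then-transform pipeline: build the groups of consecutive peaks, then map each group to its [first+add, last+add] chunk while filtering out groups whose span is <= gap.
-- intended difference: On a single-peak input with gap < 0, A returns [] because its loop body never runs, while B returns [[p+add, p+add]]; B's value is intended since A itself emits and keeps exactly such a singleton chunk for a lone last peak of a longer input. — e.g. on find_chunks([5], -1, 1): A returns [], B returns [[6, 6]]
import Mathlib
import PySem

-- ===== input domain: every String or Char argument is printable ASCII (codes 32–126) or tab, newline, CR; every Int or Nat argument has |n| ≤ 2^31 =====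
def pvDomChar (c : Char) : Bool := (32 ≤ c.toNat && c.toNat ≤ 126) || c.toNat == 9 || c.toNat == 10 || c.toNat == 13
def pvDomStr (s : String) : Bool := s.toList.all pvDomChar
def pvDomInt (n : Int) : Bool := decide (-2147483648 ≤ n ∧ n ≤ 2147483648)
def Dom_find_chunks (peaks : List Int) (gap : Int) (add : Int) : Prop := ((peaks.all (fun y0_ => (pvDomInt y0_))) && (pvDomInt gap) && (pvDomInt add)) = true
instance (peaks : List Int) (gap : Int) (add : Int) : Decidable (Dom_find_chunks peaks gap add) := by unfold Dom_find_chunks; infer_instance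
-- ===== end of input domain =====

-- B restructures A's index-loop + remove-in-loop cleanup into a group-then-transform/filter
-- pipeline (objective: simpler); on single-peak input with gap < 0 B keeps the singleton chunk
-- that A's loop never emits (see D_find_chunks below).

-- ===== PORT A =====
-- the body of A's `for i in range(len(peaks) - 1)` loop; state = (start, finish, indexes)
def findChunksLoopA (peaks : List Int) (gap add : Int)
    (st : Int × Int × List (List Int)) (i : Nat) : Int × Int × List (List Int) :=
  let start := st.1
  let indexes := st.2.2
  let j := i + 1
  let pi := (PySem.List.pyGet? peaks (i : Int)).getD 0   -- in range under Pre_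
  let pj := (PySem.List.pyGet? peaks (j : Int)).getD 0
  let st1 : Int × Int × List (List Int) :=
    if pj - pi > gap then (pj, pi, indexes ++ [[start + add, pi + add]]) else st
  if j = peaks.length - 1 then (st1.1, pj, st1.2.2 ++ [[st1.1 + add, pj + add]])
  else st1

-- A's cleanup `while i < len(indexes)` with `indexes.remove(duo)`
def findChunksClean (gap : Int) (indexes : List (List Int)) (i : Nat) : List (List Int) :=
  if h : i < indexes.length then
    let duo := indexes[i]
    if (PySem.List.pyGet? duo 1).getD 0 - (PySem.List.pyGet? duo 0).getD 0 ≤ gap then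
      findChunksClean gap ((PySem.List.remove? indexes duo).getD []) i
    else
      findChunksClean gap indexes (i + 1)
  else indexes
termination_by indexes.length - i
decreasing_by
  · have hm : indexes[i] ∈ indexes := List.getElem_mem h
    rw [PySem.List.remove?_eq_some_erase _ _ hm]
    have := List.length_erase_of_mem hm
    simp only [Option.getD_some]
    omega
  · omega

def find_chunks (peaks : List Int) (gap : Int) (add : Int) : List (List Int) :=
  let start := (PySem.List.pyGet? peaks 0).getD 0
  let finish := (PySem.List.pyGet? peaks (-1)).getD 0
  let res := (List.range (peaks.length - 1)).foldl (findChunksLoopA peaks gap add) (start, finish, [])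
  findChunksClean gap res.2.2 0

-- ===== PORT B =====
-- body of B's grouping loop over zip(peaks, peaks[1:])
def findChunksGroupStep (gap : Int) (gs : List (List Int)) (pc : Int × Int) : List (List Int) :=
  if pc.2 - pc.1 > gap then gs ++ [[pc.2]]
  else gs.dropLast ++ [gs.getLastD [] ++ [pc.2]]

def find_chunks_alt (peaks : List Int) (gap : Int) (add : Int) : List (List Int) :=
  let g0 := (PySem.List.pyGet? peaks 0).getD 0   -- in range under Pre_
  let groups := (peaks.zip peaks.tail).foldl (findChunksGroupStep gap) [[g0]]
  (groups.filter (fun g => decide (g.getLastD 0 - g.headD 0 > gap))).map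
    (fun g => [g.headD 0 + add, g.getLastD 0 + add])

-- ===== PRECONDITION & SPEC =====
-- A raises IndexError on empty peaks (peaks[0]); B raises there too.
def Pre_find_chunks (peaks : List Int) (gap : Int) (add : Int) : Prop := peaks ≠ []
instance (peaks : List Int) (gap : Int) (add : Int) : Decidable (Pre_find_chunks peaks gap add) := by
  unfold Pre_find_chunks; infer_instance
def pvWitness_find_chunks : List Int × Int × Int := ([0, 1, 2, 10, 11, 12, 13], 2, 0)

-- On a single-peak input with gap < 0, A returns [] because its loop body never runs, while B
-- returns [[p+add, p+add]]; B's value is intended since A itself emits and keeps exactly such a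
-- singleton chunk for a lone last peak of a longer input.
def D_find_chunks (peaks : List Int) (gap : Int) (add : Int) : Prop := peaks.length = 1 ∧ gap < 0
instance (peaks : List Int) (gap : Int) (add : Int) : Decidable (D_find_chunks peaks gap add) := by
  unfold D_find_chunks; infer_instance

def Spec_find_chunks (peaks : List Int) (gap : Int) (add : Int) (out : List (List Int)) : Prop :=
  ¬ D_find_chunks peaks gap add → out = find_chunks_alt peaks gap add
instance (peaks : List Int) (gap : Int) (add : Int) (out : List (List Int)) : Decidable (Spec_find_chunks peaks gap add out) := by
  unfold Spec_find_chunks; infer_instance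

def pvDiffWitness_find_chunks : List Int × Int × Int := ([5], -1, 1)
def pvDiffWitnessOut_find_chunks : (List (List Int)) × (List (List Int)) := ([], [[6, 6]])

-- ===== CLAIM (what is proved, stated in full; the proofs are below) =====
def Claim_unchanged_find_chunks : Prop := ∀ (peaks : List Int) (gap : Int) (add : Int), Dom_find_chunks peaks gap add → Pre_find_chunks peaks gap add → Spec_find_chunks peaks gap add (find_chunks peaks gap add)
def Claim_changed_find_chunks : Prop := Dom_find_chunks (pvDiffWitness_find_chunks.1) (pvDiffWitness_find_chunks.2.1) (pvDiffWitness_find_chunks.2.2) ∧ Pre_find_chunks (pvDiffWitness_find_chunks.1) (pvDiffWitness_find_chunks.2.1) (pvDiffWitness_find_chunks.2.2) ∧ D_find_chunks (pvDiffWitness_find_chunks.1) (pvDiffWitness_find_chunks.2.1) (pvDiffWitness_find_chunks.2.2) ∧ find_chunks (pvDiffWitness_find_chunks.1) (pvDiffWitness_find_chunks.2.1) (pvDiffWitness_find_chunks.2.2) = pvDiffWitnessOut_find_chunks.1 ∧ find_chunks_alt (pvDiffWitness_find_chunks.1) (pvDiffWitness_find_chunks.2.1) (pvDiffWitness_find_chunks.2.2)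 = pvDiffWitnessOut_find_chunks.2 ∧ pvDiffWitnessOut_find_chunks.1 ≠ pvDiffWitnessOut_find_chunks.2
def Claim_exact_find_chunks : Prop := ∀ (peaks : List Int) (gap : Int) (add : Int), Dom_find_chunks peaks gap add → Pre_find_chunks peaks gap add → D_find_chunks peaks gap add → find_chunks peaks gap add ≠ find_chunks_alt peaks gap add

-- ===== LEMMAS AND PROOFS =====

-- common structural spec: chunks (as [start+add, fin+add] pairs) of the remaining peaks,
-- given the current chunk's start and the previous peak fin, BEFORE the gap filter
def chunkSpec (gap add start fin : Int) : List Int → List (List Int)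
  | [] => [[start + add, fin + add]]
  | q :: l =>
    if q - fin > gap then [start + add, fin + add] :: chunkSpec gap add q q l
    else chunkSpec gap add start q l

def keepP (gap : Int) (d : List Int) : Bool :=
  !((PySem.List.pyGet? d 1).getD 0 - (PySem.List.pyGet? d 0).getD 0 ≤ gap)

-- A's cleanup is the filter keepP (first-occurrence `remove` always hits index i because
-- everything before i was kept and keepP depends only on the value)
theorem clean_eq_filter_aux (gap : Int) :
    ∀ (rest pre : List (List Int)), (∀ d ∈ pre, keepP gap d = true) →
      findChunksClean gap (pre ++ rest) pre.length = pre ++ rest.filter (keepP gap) := by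
  intro rest
  induction rest with
  | nil => intro pre _; rw [findChunksClean]; simp
  | cons d rs ih =>
    intro pre hpre
    have hlen : pre.length < (pre ++ d :: rs).length := by simp
    have hget : (pre ++ d :: rs)[pre.length]'hlen = d := by
      have : (pre ++ d :: rs)[pre.length]? = some d := by
        rw [List.getElem?_append_right (by omega)]; simp
      simpa [List.getElem?_eq_getElem hlen] using this
    rw [findChunksClean]
    simp only [hlen, dif_pos, hget]
    by_cases hk : (PySem.List.pyGet? d 1).getD 0 - (PySem.List.pyGet? d 0).getD 0 ≤ gap
    · -- removed
      have hkf : keepP gap d = false := by simp [keepP, hk]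
      have hnotpre : d ∉ pre := fun hm => by
        have := hpre d hm; rw [hkf] at this; exact absurd this (by simp)
      have hmem : d ∈ pre ++ d :: rs := by simp
      rw [if_pos hk, PySem.List.remove?_eq_some_erase _ _ hmem]
      have herase : (pre ++ d :: rs).erase d = pre ++ rs := by
        rw [List.erase_append_right _ hnotpre, List.erase_cons_head]
      rw [Option.getD_some, herase, ih pre hpre]
      simp [List.filter_cons, hkf]
    · -- kept
      have hkt : keepP gap d = true := by simp [keepP, hk]
      rw [if_neg hk]
      have h1 : pre.length + 1 = (pre ++ [d]).length := by simp
      have h2 : pre ++ d :: rs = (pre ++ [d]) ++ rs := by simp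
      have hpre' : ∀ e ∈ pre ++ [d], keepP gap e = true := by
        intro e he
        rcases List.mem_append.1 he with h | h
        · exact hpre e h
        · simp at h; subst h; exact hkt
      rw [h1, h2, ih (pre ++ [d]) hpre']
      simp [List.filter_cons, hkt]

-- shifting A's loop body to the tail of the list
theorem loopA_shift (gap add : Int) (x q : Int) (l : List Int)
    (st : Int × Int × List (List Int)) (i : Nat) :
    findChunksLoopA (x :: q :: l) gap add st (i + 1) = findChunksLoopA (q :: l) gap add st i := by
  unfold findChunksLoopA
  have h1 : ((i : Int) + 1) = ((i + 1 : Nat) : Int) := by push_cast; ring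
  have h2 : ((i : Int) + 1 + 1) = ((i + 1 + 1 : Nat) : Int) := by push_cast; ring
  have g1 : PySem.List.pyGet? (x :: q :: l) ((i + 1 : Nat) : Int) = PySem.List.pyGet? (q :: l) (i : Int) := by
    rw [← h1, PySem.List.pyGet?_cons_succ]
  have g2 : PySem.List.pyGet? (x :: q :: l) ((i + 1 + 1 : Nat) : Int) = PySem.List.pyGet? (q :: l) ((i + 1 : Nat) : Int) := by
    have h3 := PySem.List.pyGet?_cons_succ (x := x) (xs := q :: l) (n := i + 1)
    have h4 : ((i + 1 : Nat) : Int) + 1 = ((i + 1 + 1 : Nat) : Int) := by push_cast; ring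
    rw [h4] at h3
    exact h3
  have hc : (i + 1 + 1 = (x :: q :: l).length - 1) ↔ (i + 1 = (q :: l).length - 1) := by
    simp
  simp only [g1, g2]
  by_cases hb : i + 1 + 1 = (x :: q :: l).length - 1
  · rw [if_pos hb, if_pos (hc.1 hb)]
  · rw [if_neg hb, if_neg (fun h => hb (hc.2 h))]

-- A's main loop computes chunkSpec (for inputs with at least two peaks)
theorem loopA_main (gap add : Int) :
    ∀ (r : List Int) (p q start fin : Int) (acc : List (List Int)),
      ((List.range ((p :: q :: r).length - 1)).foldl (findChunksLoopA (p :: q :: r) gap add)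
        (start, fin, acc)).2.2 = acc ++ chunkSpec gap add start p (q :: r) := by
  intro r
  induction r with
  | nil =>
    intro p q start fin acc
    simp only [List.length_cons, List.length_nil]
    rw [show (0 + 1 + 1 - 1 : Nat) = 1 from rfl, List.range_one, List.foldl_cons, List.foldl_nil]
    unfold findChunksLoopA chunkSpec
    simp only [PySem.List.pyGet?_natCast]
    by_cases hb : q - p > gap <;> simp [hb, chunkSpec]
  | cons x r' ih =>
    intro p q start fin acc
    have hlen : (p :: q :: x :: r').length - 1 = ((q :: x :: r').length - 1) + 1 := by simp
    rw [hlen, List.range_succ_eq_map, List.foldl_cons, List.foldl_map]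
    have hshift : ∀ (s : Int × Int × List (List Int)) (i : Nat),
        findChunksLoopA (p :: q :: x :: r') gap add s (i.succ) =
        findChunksLoopA (q :: x :: r') gap add s i := fun s i => loopA_shift gap add p q (x :: r') s i
    have hfun : (fun (s : Int × Int × List (List Int)) (y : Nat) =>
        findChunksLoopA (p :: q :: x :: r') gap add s y.succ) =
        findChunksLoopA (q :: x :: r') gap add := by
      funext s i
      exact hshift s i
    rw [hfun]
    have hst0 : findChunksLoopA (p :: q :: x :: r') gap add (start, fin, acc) 0 =
        if q - p > gap then (q, p, acc ++ [[start + add, p + add]]) else (start, fin, acc) := by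
      unfold findChunksLoopA
      simp only [PySem.List.pyGet?_natCast]
      have : ¬ (0 + 1 = (p :: q :: x :: r').length - 1) := by simp
      by_cases hb : q - p > gap <;> simp [hb, this]
    rw [hst0]
    by_cases hb : q - p > gap
    · rw [if_pos hb, ih q x q p (acc ++ [[start + add, p + add]])]
      simp [chunkSpec, hb]
    · rw [if_neg hb, ih q x start fin acc]
      simp [chunkSpec, hb]

-- structural form of B's grouping loop: current group g (last element fin), remaining l
def grpT (gap : Int) (g : List Int) (fin : Int) : List Int → List (List Int)
  | [] => [g]
  | q :: l => if q - fin > gap then g :: grpT gap [q] q l else grpT gap (g ++ [q]) q l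

theorem groupStep_main (gap : Int) :
    ∀ (l : List Int) (gs : List (List Int)) (g : List Int) (p : Int),
      ((p :: l).zip l).foldl (findChunksGroupStep gap) (gs ++ [g]) = gs ++ grpT gap g p l := by
  intro l
  induction l with
  | nil => intro gs g p; simp [grpT]
  | cons q l' ih =>
    intro gs g p
    rw [show (p :: q :: l').zip (q :: l') = (p, q) :: ((q :: l').zip l') from rfl, List.foldl_cons]
    by_cases hb : q - p > gap
    · have hstep : findChunksGroupStep gap (gs ++ [g]) (p, q) = (gs ++ [g]) ++ [[q]] := by
        simp [findChunksGroupStep, hb]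
      rw [hstep, ih (gs ++ [g]) [q] q]
      simp [grpT, hb]
    · have hstep : findChunksGroupStep gap (gs ++ [g]) (p, q) = gs ++ [g ++ [q]] := by
        simp [findChunksGroupStep, hb, List.dropLast_concat, List.getLastD_concat]
      rw [hstep, ih gs (g ++ [q]) q]
      simp [grpT, hb]

def toPairB (add : Int) (g : List Int) : List Int := [g.headD 0 + add, g.getLastD 0 + add]

theorem grpT_map (gap add : Int) :
    ∀ (l : List Int) (g : List Int) (fin : Int), g ≠ [] → g.getLastD 0 = fin →
      (grpT gap g fin l).map (toPairB add) = chunkSpec gap add (g.headD 0) fin l := by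
  intro l
  induction l with
  | nil =>
    intro g fin _ hlast
    rw [List.getLastD_eq_getLast?] at hlast
    simp [grpT, chunkSpec, toPairB, hlast]
  | cons q l' ih =>
    intro g fin hne hlast
    unfold grpT chunkSpec
    by_cases hb : q - fin > gap
    · rw [if_pos hb, if_pos hb, List.map_cons, ih [q] q (by simp) (by simp)]
      rw [List.getLastD_eq_getLast?] at hlast
      simp [toPairB, hlast]
    · rw [if_neg hb, if_neg hb, ih (g ++ [q]) q (by simp) (by simp)]
      obtain ⟨h, t, rfl⟩ := List.exists_cons_of_ne_nil hne
      simp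
theorem chunkSpec_shape (gap add : Int) :
    ∀ (l : List Int) (start fin : Int), ∀ d ∈ chunkSpec gap add start fin l, ∃ a b, d = [a, b] := by
  intro l
  induction l with
  | nil => intro start fin d hd; simp [chunkSpec] at hd; exact ⟨_, _, hd⟩
  | cons q l' ih =>
    intro start fin d hd
    unfold chunkSpec at hd
    by_cases hb : q - fin > gap
    · rw [if_pos hb] at hd
      rcases List.mem_cons.1 hd with hd | hd
      · exact ⟨_, _, hd⟩
      · exact ih q q d hd
    · rw [if_neg hb] at hd; exact ih start q d hd

-- the two filter predicates agree on 2-element chunks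
theorem filter_chunkSpec (gap add : Int) (l : List Int) (start fin : Int) :
    (chunkSpec gap add start fin l).filter (fun d => decide (d.getLastD 0 - d.headD 0 > gap)) =
    (chunkSpec gap add start fin l).filter (keepP gap) := by
  apply List.filter_congr
  intro d hd
  obtain ⟨a, b, rfl⟩ := chunkSpec_shape gap add l start fin d hd
  have h1 : (PySem.List.pyGet? [a, b] 1).getD 0 = b := by
    rw [show (1 : Int) = ((1 : Nat) : Int) from rfl, PySem.List.pyGet?_natCast]
    rfl
  have h0 : (PySem.List.pyGet? [a, b] 0).getD 0 = a := by
    rw [PySem.List.pyGet?_zero_cons]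
    rfl
  have hL : ([a, b] : List Int).getLastD 0 = b := rfl
  have hH : ([a, b] : List Int).headD 0 = a := rfl
  simp only [keepP, h1, h0, hL, hH]
  rw [Bool.eq_iff_iff]
  simp only [decide_eq_true_eq, Bool.not_eq_true', decide_eq_false_iff_not]
  constructor <;> intro h' <;> omega

theorem altB_eq (gap add : Int) (p : Int) (rest : List Int) :
    find_chunks_alt (p :: rest) gap add =
    (chunkSpec gap add p p rest).filter (keepP gap) := by
  unfold find_chunks_alt
  simp only [PySem.List.pyGet?_zero_cons, Option.getD_some, List.tail_cons]
  rw [show ([[p]] : List (List Int)) = [] ++ [[p]] from rfl, groupStep_main gap rest [] [p] p]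
  rw [List.nil_append]
  have hmap := grpT_map gap add rest [p] p (by simp) (by simp)
  have hcomm : ((grpT gap [p] p rest).filter (fun g => decide (g.getLastD 0 - g.headD 0 > gap))).map
      (fun g => [g.headD 0 + add, g.getLastD 0 + add]) =
      ((grpT gap [p] p rest).map (toPairB add)).filter (fun d => decide (d.getLastD 0 - d.headD 0 > gap)) := by
    rw [List.filter_map]
    congr 1
    apply List.filter_congr
    intro g _
    simp only [Function.comp_apply, toPairB]
    have hL : ([g.headD 0 + add, g.getLastD 0 + add] : List Int).getLastD 0 = g.getLastD 0 + add := rfl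
    have hH : ([g.headD 0 + add, g.getLastD 0 + add] : List Int).headD 0 = g.headD 0 + add := rfl
    simp only [hL, hH]
    rw [Bool.eq_iff_iff]
    simp only [decide_eq_true_eq]
    constructor <;> intro h' <;> omega
  rw [hcomm, hmap]
  simpa using filter_chunkSpec gap add rest p p

theorem findA_eq (gap add : Int) (p q : Int) (r : List Int) :
    find_chunks (p :: q :: r) gap add =
    (chunkSpec gap add p p (q :: r)).filter (keepP gap) := by
  unfold find_chunks
  simp only [PySem.List.pyGet?_zero_cons, Option.getD_some]
  rw [loopA_main gap add r p q p _ []]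
  rw [show ((0 : Nat)) = ([] : List (List Int)).length from rfl]
  rw [clean_eq_filter_aux gap _ [] (by simp)]
  simp

theorem findA_singleton (gap add p : Int) : find_chunks [p] gap add = [] := by
  unfold find_chunks
  simp only [List.length_cons, List.length_nil, Nat.add_sub_cancel, List.range_zero,
    List.foldl_nil]
  rw [findChunksClean]
  simp

theorem altB_singleton (gap add p : Int) :
    find_chunks_alt [p] gap add = if 0 > gap then [[p + add, p + add]] else [] := by
  unfold find_chunks_alt
  simp [List.filter_cons, findChunksGroupStep]
  split_ifs <;> simp_all

-- ===== VERDICT (by name: the statement is the Claim_ definition above) =====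
theorem find_chunks_spec : Claim_unchanged_find_chunks := by
  intro peaks gap add _ hpre hnd
  match peaks with
  | [] => exact absurd rfl hpre
  | [p] =>
    have hg : ¬ gap < 0 := fun hg => hnd ⟨rfl, hg⟩
    rw [findA_singleton, altB_singleton, if_neg (by omega)]
  | p :: q :: r =>
    rw [findA_eq gap add p q r, altB_eq gap add p (q :: r)]

theorem find_chunks_changed : Claim_changed_find_chunks := by
  unfold Claim_changed_find_chunks
  refine ⟨by decide, by decide, by decide, ?_, by decide, by decide⟩
  show find_chunks [5] (-1) 1 = ([] : List (List Int))
  exact findA_singleton (-1) 1 5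

theorem find_chunks_tight : Claim_exact_find_chunks := by
  intro peaks gap add _ _ hd
  obtain ⟨hlen, hg⟩ := hd
  match peaks, hlen with
  | [p], _ =>
    rw [findA_singleton, altB_singleton, if_pos (by omega)]
    simp
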